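-- pv_equiv track=rewrite | github.com/ittkirsan/lessons-survivor | lesson13/lesson13.py | UFO
-- ===== SOURCE A (Python) =====
-- def UFO(N, data, octal):
--
--     array_of_numbers_in_decimal_system = []
--     if octal == True:
--
--         for k in data:
--             el = str(k)
--             elstr = el.strip()
--             len_el = len(elstr)-1
--             base_8 = 0
--             for i in elstr:
--                 base_8 += int(i) * (8**len_el)
--                 len_el -= 1
--             array_of_numbers_in_decimal_system.append(base_8)
--
--     else:
--         for k in data:
--             el = str(k)
--             elstr = el.strip()
--             len_el = len(elstr)-1
--             base_16 = 0
--             for i in elstr: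
--                 base_16 += int(i) * (16**len_el)
--                 len_el -= 1
--             array_of_numbers_in_decimal_system.append(base_16)
--
--     return array_of_numbers_in_decimal_system
-- ===== SOURCE B (Python) =====
-- def UFO(N, data, octal):
--     base = 8 if octal == True else 16
--     result = []
--     for k in data:
--         acc = 0
--         for ch in str(k).strip():
--             acc = acc * base + int(ch)
--         result.append(acc)
--     return result
-- ===== Notes on version B (the rewrite author's own statement) =====
-- stated objective: simpler
-- what changed: Replaces the two duplicated per-base loops that recompute base**position for every digit with a single unified loop choosing the base once and folding each digit string with Horner's rule (acc = acc*base + digit).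
import Mathlib
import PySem

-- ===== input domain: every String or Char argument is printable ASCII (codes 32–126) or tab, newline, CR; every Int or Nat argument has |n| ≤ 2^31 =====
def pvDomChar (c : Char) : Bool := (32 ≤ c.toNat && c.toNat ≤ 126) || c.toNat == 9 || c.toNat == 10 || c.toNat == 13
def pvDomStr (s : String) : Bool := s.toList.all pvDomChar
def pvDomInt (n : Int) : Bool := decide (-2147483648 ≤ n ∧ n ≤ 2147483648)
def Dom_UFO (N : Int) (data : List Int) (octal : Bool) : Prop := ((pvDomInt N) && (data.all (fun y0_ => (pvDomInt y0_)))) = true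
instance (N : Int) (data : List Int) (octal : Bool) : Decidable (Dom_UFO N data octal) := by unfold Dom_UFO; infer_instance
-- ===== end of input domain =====

-- B replaces A's two duplicated per-base loops (recomputing base**position per digit) by one
-- unified Horner fold; objective: simpler. Equivalence of return values proved on Pre_ below.

-- int(i) for a single char i; exact when i is a decimal digit '0'..'9', which is the case for
-- every char of str(k).strip() with k ≥ 0 (Pre_ excludes negative k, where Python raises ValueError).
def pyDigit (c : Char) : Int := (c.toNat : Int) - 48

-- ===== PORT A =====
-- inner loop state: (base_8/base_16 accumulator, len_el); exponent len_el is ≥ 0 whenever it is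
-- used (it starts at len-1 and is used once per char), so ^ len_el.toNat is exact.
def UFO (N : Int) (data : List Int) (octal : Bool) : List Int :=
  if octal == true then
    data.foldl (fun arr k =>
      let elstr := PySem.Chars.strip (PySem.Int.toChars k)
      let st := elstr.foldl (fun (p : Int × Int) i => (p.1 + pyDigit i * 8 ^ p.2.toNat, p.2 - 1))
        (0, (elstr.length : Int) - 1)
      arr ++ [st.1]) []
  else
    data.foldl (fun arr k =>
      let elstr := PySem.Chars.strip (PySem.Int.toChars k)
      let st := elstr.foldl (fun (p : Int × Int) i => (p.1 + pyDigit i * 16 ^ p.2.toNat, p.2 - 1))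
        (0, (elstr.length : Int) - 1)
      arr ++ [st.1]) []

-- ===== PORT B =====
def UFO_alt (N : Int) (data : List Int) (octal : Bool) : List Int :=
  let base : Int := if octal == true then 8 else 16
  data.map (fun k =>
    (PySem.Chars.strip (PySem.Int.toChars k)).foldl (fun acc ch => acc * base + pyDigit ch) 0)

-- ===== PRECONDITION & SPEC =====
-- Pre_ excludes negative elements of data: there str(k) contains '-' and both A and B raise
-- ValueError at int('-').
def Pre_UFO (N : Int) (data : List Int) (octal : Bool) : Prop := ∀ k ∈ data, 0 ≤ k
instance (N : Int) (data : List Int) (octal : Bool) : Decidable (Pre_UFO N data octal) := by unfold Pre_UFO; infer_instance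

def pvWitness_UFO : Int × List Int × Bool := (0, [17, 0, 305], true)

def Spec_UFO (N : Int) (data : List Int) (octal : Bool) (out : List Int) : Prop := out = UFO_alt N data octal
instance (N : Int) (data : List Int) (octal : Bool) (out : List Int) : Decidable (Spec_UFO N data octal out) := by unfold Spec_UFO; infer_instance

-- ===== CLAIM (what is proved, stated in full; the proofs are below) =====
def Claim_equal_UFO : Prop := ∀ (N : Int) (data : List Int) (octal : Bool), Dom_UFO N data octal → Pre_UFO N data octal → Spec_UFO N data octal (UFO N data octal)

-- ===== LEMMAS AND PROOFS =====

-- Horner fold shifts its accumulator by base^len.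
theorem horner_shift (base : Int) (cs : List Char) (a : Int) :
    cs.foldl (fun acc ch => acc * base + pyDigit ch) a
      = a * base ^ cs.length + cs.foldl (fun acc ch => acc * base + pyDigit ch) 0 := by
  induction cs generalizing a with
  | nil => simp
  | cons c cs ih =>
    simp only [List.foldl_cons, List.length_cons]
    rw [ih (a * base + pyDigit c), ih (0 * base + pyDigit c)]
    ring

-- A's positional-powers fold started at exponent len-1 equals B's Horner fold.
theorem pow_fold_eq_horner (base : Int) (cs : List Char) (a : Int) :
    (cs.foldl (fun (p : Int × Int) i => (p.1 + pyDigit i * base ^ p.2.toNat, p.2 - 1))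
        (a, (cs.length : Int) - 1)).1
      = a + cs.foldl (fun acc ch => acc * base + pyDigit ch) 0 := by
  induction cs generalizing a with
  | nil => simp
  | cons c cs ih =>
    simp only [List.foldl_cons, List.length_cons]
    have h1 : ((cs.length + 1 : Nat) : Int) - 1 = (cs.length : Int) := by push_cast; ring
    have h2 : ((cs.length : Int)).toNat = cs.length := Int.toNat_natCast _
    rw [h1, h2, ih (a + pyDigit c * base ^ cs.length),
      horner_shift base cs (0 * base + pyDigit c)]
    ring

theorem foldl_append_map {α β : Type} (f : α → β) (data : List α) (acc : List β) :
    data.foldl (fun arr k => arr ++ [f k]) acc = acc ++ data.map f := by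
  induction data generalizing acc with
  | nil => simp
  | cons k ks ih => simp [ih]

-- ===== VERDICT (by name: the statement is the Claim_ definition above) =====
theorem UFO_spec : Claim_equal_UFO := by
  intro N data octal _ _
  unfold Spec_UFO UFO UFO_alt
  by_cases h : octal = true <;>
    simp only [h, Bool.false_eq_true, beq_self_eq_true, beq_iff_eq, if_true, if_false] <;>
  · rw [foldl_append_map]
    simp only [List.nil_append]
    apply List.map_congr_left
    intro k _
    rw [pow_fold_eq_horner]
    ring_nf
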